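-- pv_equiv track=rewrite | github.com/the-other-marcus/anonymous-gloomhaven | uf.py | link_rotate
-- ===== SOURCE A (Python) =====
-- def link_rotate(link_, angle):
--     link = link_.copy()
--     for step in range(angle):
--         link_coordinates = link[0:3]
--         oc = link_coordinates
--         link[0:3] = [-oc[1], -oc[2], -oc[0]]
--         link[3] = (link[3] + 2) % 12
--     return link
-- ===== SOURCE B (Python) =====
-- def link_rotate(link_, angle):
--     link = link_.copy()
--     if angle <= 0:
--         return link
--     x, y, z = link[0], link[1], link[2]
--     r = angle % 6
--     s = -1 if r % 2 == 1 else 1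
--     if r % 3 == 0:
--         p = (x, y, z)
--     elif r % 3 == 1:
--         p = (y, z, x)
--     else:
--         p = (z, x, y)
--     link[0], link[1], link[2] = s * p[0], s * p[1], s * p[2]
--     link[3] = (link[3] + 2 * angle) % 12
--     return link
-- ===== Notes on version B (the rewrite author's own statement) =====
-- stated objective: faster
-- what changed: B replaces the O(angle) loop by a closed form: the coordinate transform has period 6 so it is read off a 6-case table at angle % 6, and the orientation becomes (link[3] + 2*angle) % 12 directly.
import Mathlib
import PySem

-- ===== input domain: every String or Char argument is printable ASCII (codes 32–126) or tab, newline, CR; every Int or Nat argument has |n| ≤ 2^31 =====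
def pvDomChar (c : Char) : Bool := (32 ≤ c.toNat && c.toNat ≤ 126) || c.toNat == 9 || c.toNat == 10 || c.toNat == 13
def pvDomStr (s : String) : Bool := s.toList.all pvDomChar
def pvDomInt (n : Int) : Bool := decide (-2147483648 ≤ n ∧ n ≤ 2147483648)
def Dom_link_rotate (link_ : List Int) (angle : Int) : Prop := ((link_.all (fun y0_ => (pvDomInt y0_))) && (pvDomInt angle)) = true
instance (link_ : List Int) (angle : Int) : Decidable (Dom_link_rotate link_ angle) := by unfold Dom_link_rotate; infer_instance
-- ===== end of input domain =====

-- B replaces A's O(angle) loop by the period-6 closed form of the coordinate transform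
-- and a single (link[3] + 2*angle) % 12 update (objective: faster).

-- ===== PORT A =====
-- one iteration of A's for-loop body
def pvStepA (link : List Int) : List Int :=
  let oc := PySem.List.slice link (some 0) (some 3)
  let link1 := [-(PySem.List.pyGetD oc 1 0), -(PySem.List.pyGetD oc 2 0),
                -(PySem.List.pyGetD oc 0 0)] ++ link.drop 3
  PySem.List.pySetD link1 3 (PySem.Int.mod (PySem.List.pyGetD link1 3 0 + 2) 12)

-- 'for step in range(angle)': the loop body applied angle.toNat times, left to right
def pvIterA : Nat → List Int → List Int
  | 0, link => link
  | n + 1, link => pvIterA n (pvStepA link)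

def link_rotate (link_ : List Int) (angle : Int) : List Int :=
  pvIterA angle.toNat link_

-- ===== PORT B =====
def link_rotate_alt (link_ : List Int) (angle : Int) : List Int :=
  if angle ≤ 0 then link_
  else
    let x := PySem.List.pyGetD link_ 0 0
    let y := PySem.List.pyGetD link_ 1 0
    let z := PySem.List.pyGetD link_ 2 0
    let r := PySem.Int.mod angle 6
    let s : Int := if PySem.Int.mod r 2 = 1 then -1 else 1
    let p : Int × Int × Int :=
      if PySem.Int.mod r 3 = 0 then (x, y, z)
      else if PySem.Int.mod r 3 = 1 then (y, z, x)
      else (z, x, y)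
    let w := PySem.Int.mod (PySem.List.pyGetD link_ 3 0 + 2 * angle) 12
    PySem.List.pySetD (PySem.List.pySetD (PySem.List.pySetD
      (PySem.List.pySetD link_ 0 (s * p.1)) 1 (s * p.2.1)) 2 (s * p.2.2)) 3 w

-- ===== PRECONDITION & SPEC =====
-- Pre_ excludes exactly the inputs on which A raises an IndexError:
-- a positive angle with fewer than 4 list elements (oc[1]/oc[2]/link[3] out of range).
def Pre_link_rotate (link_ : List Int) (angle : Int) : Prop :=
  angle ≤ 0 ∨ 4 ≤ link_.length
instance (link_ : List Int) (angle : Int) : Decidable (Pre_link_rotate link_ angle) := by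
  unfold Pre_link_rotate; infer_instance

def pvWitness_link_rotate : List Int × Int := ([3, -5, 7, 11, 9], 5)

def Spec_link_rotate (link_ : List Int) (angle : Int) (out : List Int) : Prop := out = link_rotate_alt link_ angle
instance (link_ : List Int) (angle : Int) (out : List Int) : Decidable (Spec_link_rotate link_ angle out) := by unfold Spec_link_rotate; infer_instance

-- ===== CLAIM (what is proved, stated in full; the proofs are below) =====
def Claim_equal_link_rotate : Prop := ∀ (link_ : List Int) (angle : Int), Dom_link_rotate link_ angle → Pre_link_rotate link_ angle → Spec_link_rotate link_ angle (link_rotate link_ angle)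

-- ===== LEMMAS AND PROOFS =====

-- small indexing/assignment lemmas on 4-element-headed lists
lemma pvGetD0 (x : Int) (l : List Int) (d : Int) : PySem.List.pyGetD (x::l) 0 d = x := by
  simp [PySem.List.pyGetD, PySem.List.pyGet?, PySem.List.pyIdx?]
lemma pvGetD1 (x y : Int) (l : List Int) (d : Int) : PySem.List.pyGetD (x::y::l) 1 d = y := by
  simp [PySem.List.pyGetD, PySem.List.pyGet?, PySem.List.pyIdx?]
lemma pvGetD2 (x y z : Int) (l : List Int) (d : Int) : PySem.List.pyGetD (x::y::z::l) 2 d = z := by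
  simp [PySem.List.pyGetD, PySem.List.pyGet?, PySem.List.pyIdx?]
  rw [if_pos (by omega)]; simp
lemma pvGetD3 (x y z w : Int) (l : List Int) (d : Int) : PySem.List.pyGetD (x::y::z::w::l) 3 d = w := by
  simp [PySem.List.pyGetD, PySem.List.pyGet?, PySem.List.pyIdx?]
  rw [if_pos (by omega)]; simp
lemma pvSetD0 (x : Int) (l : List Int) (v : Int) : PySem.List.pySetD (x::l) 0 v = v::l := by
  simp [PySem.List.pySetD, PySem.List.pySet?, PySem.List.pyIdx?]
lemma pvSetD1 (x y : Int) (l : List Int) (v : Int) : PySem.List.pySetD (x::y::l) 1 v = x::v::l := by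
  simp [PySem.List.pySetD, PySem.List.pySet?, PySem.List.pyIdx?]
lemma pvSetD2 (x y z : Int) (l : List Int) (v : Int) : PySem.List.pySetD (x::y::z::l) 2 v = x::y::v::l := by
  simp [PySem.List.pySetD, PySem.List.pySet?, PySem.List.pyIdx?]
  rw [if_pos (by omega)]; simp
lemma pvSetD3 (x y z w : Int) (l : List Int) (v : Int) : PySem.List.pySetD (x::y::z::w::l) 3 v = x::y::z::v::l := by
  simp [PySem.List.pySetD, PySem.List.pySet?, PySem.List.pyIdx?]
  rw [if_pos (by omega)]; simp

lemma pvStepA_cons (x y z w : Int) (rest : List Int) :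
    pvStepA (x :: y :: z :: w :: rest) = (-y) :: (-z) :: (-x) :: ((w + 2) % 12) :: rest := by
  show PySem.List.pySetD _ 3 _ = _
  have hoc : PySem.List.slice (x :: y :: z :: w :: rest) (some 0) (some 3) = [x, y, z] := by
    simp [PySem.List.slice]
  rw [hoc]
  simp only [pvGetD0, pvGetD1, pvGetD2, List.cons_append, List.nil_append, List.drop_succ_cons,
             List.drop_zero, pvGetD3, pvSetD3]
  rw [PySem.Int.mod_eq_emod_of_pos (by norm_num)]

-- the coordinate transform of one loop iteration, iterated
def pvG : Nat → Int × Int × Int → Int × Int × Int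
  | 0, v => v
  | n + 1, (x, y, z) => pvG n (-y, -z, -x)

-- its closed form by the residue of n mod 6
def pvF (n : Nat) (x y z : Int) : Int × Int × Int :=
  match n % 6 with
  | 0 => (x, y, z)
  | 1 => (-y, -z, -x)
  | 2 => (z, x, y)
  | 3 => (-x, -y, -z)
  | 4 => (y, z, x)
  | _ => (-z, -x, -y)

lemma pvMod12_shift (w : Int) (k : Int) : (w % 12 + k) % 12 = (w + k) % 12 := by
  conv_rhs => rw [Int.add_emod]
  rw [Int.add_emod, Int.emod_emod_of_dvd _ (by norm_num : (12:Int) ∣ 12)]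

lemma pvIterA_cons (m : Nat) (x y z w : Int) (rest : List Int) :
    pvIterA (m + 1) (x :: y :: z :: w :: rest) =
      (pvG (m + 1) (x, y, z)).1 :: (pvG (m + 1) (x, y, z)).2.1 :: (pvG (m + 1) (x, y, z)).2.2 ::
        ((w + 2 * ((m : Int) + 1)) % 12) :: rest := by
  induction m generalizing x y z w with
  | zero =>
    rw [pvIterA, pvStepA_cons]
    simp [pvIterA, pvG]
  | succ k ih =>
    rw [pvIterA, pvStepA_cons, ih]
    have hG : pvG (k + 1) (-y, -z, -x) = pvG (k + 1 + 1) (x, y, z) := by simp [pvG]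
    have hmod : ((w + 2) % 12 + 2 * ((k : Int) + 1)) % 12
        = (w + 2 * (((k + 1 : Nat) : Int) + 1)) % 12 := by
      rw [pvMod12_shift]; push_cast; ring_nf
    rw [hG, hmod]

lemma pvG_six (n : Nat) (x y z : Int) : pvG (n + 6) (x, y, z) = pvG n (x, y, z) := by
  show pvG (n + 5 + 1) (x, y, z) = pvG n (x, y, z)
  rw [pvG]; show pvG (n + 4 + 1) _ = _
  rw [pvG]; show pvG (n + 3 + 1) _ = _
  rw [pvG]; show pvG (n + 2 + 1) _ = _
  rw [pvG]; show pvG (n + 1 + 1) _ = _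
  rw [pvG]; show pvG (n + 1) _ = _
  rw [pvG]; simp

lemma pvG_eq_pvF (n : Nat) (x y z : Int) : pvG n (x, y, z) = pvF n x y z := by
  induction n using Nat.strong_induction_on with
  | _ n ih =>
    by_cases h : n < 6
    · interval_cases n <;> simp [pvG, pvF]
    · obtain ⟨m, rfl⟩ : ∃ m, n = m + 6 := ⟨n - 6, by omega⟩
      rw [pvG_six, ih m (by omega)]
      simp [pvF, Nat.add_mod_right]

lemma pvAlt_cons (x y z w : Int) (rest : List Int) (angle : Int) (h : ¬ angle ≤ 0) :
    link_rotate_alt (x :: y :: z :: w :: rest) angle =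
      (let r := PySem.Int.mod angle 6
       let s : Int := if PySem.Int.mod r 2 = 1 then -1 else 1
       let p : Int × Int × Int :=
         if PySem.Int.mod r 3 = 0 then (x, y, z)
         else if PySem.Int.mod r 3 = 1 then (y, z, x)
         else (z, x, y)
       (s * p.1) :: (s * p.2.1) :: (s * p.2.2) ::
         (PySem.Int.mod (w + 2 * angle) 12) :: rest) := by
  unfold link_rotate_alt
  rw [if_neg h]
  simp only [pvGetD0, pvGetD1, pvGetD2, pvGetD3, pvSetD0, pvSetD1, pvSetD2, pvSetD3]

-- ===== VERDICT (by name: the statement is the Claim_ definition above) =====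
theorem link_rotate_spec : Claim_equal_link_rotate := by
  intro link_ angle _ hpre
  unfold Spec_link_rotate link_rotate
  by_cases hneg : angle ≤ 0
  · have h0 : angle.toNat = 0 := by omega
    rw [h0]
    unfold link_rotate_alt
    rw [if_pos hneg]
    rfl
  · have hlen : 4 ≤ link_.length := by
      rcases hpre with h | h
      · omega
      · exact h
    obtain ⟨x, y, z, w, rest, rfl⟩ :
        ∃ x y z w rest, link_ = x :: y :: z :: w :: rest := by
      match link_, hlen with
      | x :: y :: z :: w :: rest, _ => exact ⟨x, y, z, w, rest, rfl⟩
    obtain ⟨m, hm⟩ : ∃ m, angle.toNat = m + 1 := ⟨angle.toNat - 1, by omega⟩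
    rw [hm, pvIterA_cons, pvG_eq_pvF, pvAlt_cons _ _ _ _ _ _ hneg]
    have hang : ((m : Int) + 1) = angle := by omega
    set n := m + 1 with hn
    have hcast : ((n : Nat) : Int) = angle := by push_cast [hn]; omega
    have hmod6 : PySem.Int.mod angle 6 = ((n % 6 : Nat) : Int) := by
      rw [← hcast]; exact_mod_cast PySem.Int.mod_natCast n 6
    have hmod12 : PySem.Int.mod (w + 2 * angle) 12 = (w + 2 * angle) % 12 :=
      PySem.Int.mod_eq_emod_of_pos (by norm_num)
    have h6 : n % 6 < 6 := Nat.mod_lt _ (by norm_num)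
    simp only [hmod6, hmod12]
    rw [show (m : Int) + 1 = angle from hang, ← hcast]
    unfold pvF
    interval_cases h : n % 6 <;> norm_num [PySem.Int.mod_natCast]
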